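-- pv_equiv track=rewrite | github.com/jamie-large/Advent-of-Code-2018 | day16.py | execute_instruction
-- ===== SOURCE A (Python) =====
-- def execute_instruction(instruction: tuple[int, int, int, int], registry: tuple[int, int, int, int], instruction_map: dict[int, str]):
--     registry_copy = [x for x in registry]
--     inst = instruction_map[instruction[0]]
--     if inst == "addr":
--         registry_copy[instruction[3]] = registry[instruction[1]] + registry[instruction[2]]
--     elif inst == "addi":
--         registry_copy[instruction[3]] = registry[instruction[1]] + instruction[2]
--     elif inst == "mulr":
--         registry_copy[instruction[3]] = registry[instruction[1]] * registry[instruction[2]]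
--     elif inst == "muli":
--         registry_copy[instruction[3]] = registry[instruction[1]] * instruction[2]
--     elif inst == "banr":
--         registry_copy[instruction[3]] = registry[instruction[1]] & registry[instruction[2]]
--     elif inst == "bani":
--         registry_copy[instruction[3]] = registry[instruction[1]] & instruction[2]
--     elif inst == "borr":
--         registry_copy[instruction[3]] = registry[instruction[1]] | registry[instruction[2]]
--     elif inst == "bori":
--         registry_copy[instruction[3]] = registry[instruction[1]] | instruction[2]
--     elif inst == "setr":
--         registry_copy[instruction[3]] = registry[instruction[1]]
--     elif inst == "seti":
--         registry_copy[instruction[3]] = instruction[1]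
--     elif inst == "gtir":
--         registry_copy[instruction[3]] = 1 if instruction[1] > registry[instruction[2]] else 0
--     elif inst == "gtri":
--         registry_copy[instruction[3]] = 1 if registry[instruction[1]] > instruction[2] else 0
--     elif inst == "gtrr":
--         registry_copy[instruction[3]] = 1 if registry[instruction[1]] > registry[instruction[2]] else 0
--     elif inst == "eqir":
--         registry_copy[instruction[3]] = 1 if instruction[1] == registry[instruction[2]] else 0
--     elif inst == "eqri":
--         registry_copy[instruction[3]] = 1 if registry[instruction[1]] == instruction[2] else 0
--     elif inst == "eqrr":
--         registry_copy[instruction[3]] = 1 if registry[instruction[1]] == registry[instruction[2]] else 0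
--     return (registry_copy[0], registry_copy[1], registry_copy[2], registry_copy[3])
-- ===== SOURCE B (Python) =====
-- # Table-driven interpreter: one mode table (operand kinds) + one shared apply,
-- # replacing the 16-way if/elif chain.
--
-- MODES = {
--     'addr': ('+', 'r', 'r'), 'addi': ('+', 'r', 'i'),
--     'mulr': ('*', 'r', 'r'), 'muli': ('*', 'r', 'i'),
--     'banr': ('&', 'r', 'r'), 'bani': ('&', 'r', 'i'),
--     'borr': ('|', 'r', 'r'), 'bori': ('|', 'r', 'i'),
--     'setr': ('s', 'r', 'i'), 'seti': ('s', 'i', 'i'),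
--     'gtir': ('>', 'i', 'r'), 'gtri': ('>', 'r', 'i'), 'gtrr': ('>', 'r', 'r'),
--     'eqir': ('=', 'i', 'r'), 'eqri': ('=', 'r', 'i'), 'eqrr': ('=', 'r', 'r'),
-- }
--
--
-- def _apply(op, u, v):
--     if op == '+':
--         return u + v
--     if op == '*':
--         return u * v
--     if op == '&':
--         return u & v
--     if op == '|':
--         return u | v
--     if op == 's':
--         return u
--     if op == '>':
--         return 1 if u > v else 0
--     return 1 if u == v else 0
--
--
-- def execute_instruction(instruction, registry, instruction_map):
--     opc, a, b, c = instruction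
--     name = instruction_map[opc]
--     regs = list(registry)
--     if name in MODES:
--         op, m1, m2 = MODES[name]
--         u = regs[a] if m1 == 'r' else a
--         v = regs[b] if m2 == 'r' else b
--         regs[c] = _apply(op, u, v)
--     return (regs[0], regs[1], regs[2], regs[3])
-- ===== Notes on version B (the rewrite author's own statement) =====
-- stated objective: alternative
-- what changed: Replaced A's 16-way if/elif chain by a data table mapping each opcode name to (operator, operand-mode, operand-mode) plus one generic resolve-operands-then-apply step.
-- outside the precondition, e.g. on execute_instruction((0, 0, 0, 0), (1, 2, 3, 4), {1: 'addr'}): A raises KeyError, B raises KeyError; on execute_instruction((0, 5, 0, 0), (1, 2, 3, 4), {0: 'addr'}): A raises IndexError, B raises IndexError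
import Mathlib
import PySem

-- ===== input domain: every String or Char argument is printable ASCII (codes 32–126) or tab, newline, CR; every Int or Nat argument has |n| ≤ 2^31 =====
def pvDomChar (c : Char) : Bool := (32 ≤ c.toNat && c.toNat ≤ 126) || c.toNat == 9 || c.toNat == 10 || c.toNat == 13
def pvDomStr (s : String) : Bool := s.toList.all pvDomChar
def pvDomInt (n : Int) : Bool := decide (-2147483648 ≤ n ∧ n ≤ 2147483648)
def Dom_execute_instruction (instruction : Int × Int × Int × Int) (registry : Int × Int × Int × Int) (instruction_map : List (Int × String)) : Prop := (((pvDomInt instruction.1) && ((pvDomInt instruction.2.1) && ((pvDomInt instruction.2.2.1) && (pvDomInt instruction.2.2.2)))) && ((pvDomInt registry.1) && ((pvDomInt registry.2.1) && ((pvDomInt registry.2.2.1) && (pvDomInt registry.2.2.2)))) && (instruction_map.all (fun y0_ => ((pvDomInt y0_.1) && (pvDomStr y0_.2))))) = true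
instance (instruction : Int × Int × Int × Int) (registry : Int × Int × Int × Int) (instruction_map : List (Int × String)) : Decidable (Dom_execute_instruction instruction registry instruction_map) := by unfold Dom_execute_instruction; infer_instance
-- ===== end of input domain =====

-- B replaces A's 16-way if/elif chain by a mode table plus one shared apply function (objective: alternative decomposition, same cost).


-- shared helper: Python dict lookup on the association list (first match)
def pvLookup (m : List (Int × String)) (k : Int) : Option String :=
  (m.find? (fun p => p.1 == k)).map (·.2)

-- ===== PORT A =====
def execute_instruction (instruction : Int × Int × Int × Int) (registry : Int × Int × Int × Int) (instruction_map : List (Int × String)) : Int × Int × Int × Int :=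
  let regs : List Int := [registry.1, registry.2.1, registry.2.2.1, registry.2.2.2]
  let i1 := instruction.2.1
  let i2 := instruction.2.2.1
  let i3 := instruction.2.2.2
  -- instruction_map[instruction[0]]: total form, "" only outside Pre_
  let inst := (pvLookup instruction_map instruction.1).getD ""
  let regs' : List Int :=
    if inst = "addr" then PySem.List.pySetD regs i3 (PySem.List.pyGetD regs i1 0 + PySem.List.pyGetD regs i2 0)
    else if inst = "addi" then PySem.List.pySetD regs i3 (PySem.List.pyGetD regs i1 0 + i2)
    else if inst = "mulr" then PySem.List.pySetD regs i3 (PySem.List.pyGetD regs i1 0 * PySem.List.pyGetD regs i2 0)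
    else if inst = "muli" then PySem.List.pySetD regs i3 (PySem.List.pyGetD regs i1 0 * i2)
    else if inst = "banr" then PySem.List.pySetD regs i3 (PySem.Int.band (PySem.List.pyGetD regs i1 0) (PySem.List.pyGetD regs i2 0))
    else if inst = "bani" then PySem.List.pySetD regs i3 (PySem.Int.band (PySem.List.pyGetD regs i1 0) i2)
    else if inst = "borr" then PySem.List.pySetD regs i3 (PySem.Int.bor (PySem.List.pyGetD regs i1 0) (PySem.List.pyGetD regs i2 0))
    else if inst = "bori" then PySem.List.pySetD regs i3 (PySem.Int.bor (PySem.List.pyGetD regs i1 0) i2)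
    else if inst = "setr" then PySem.List.pySetD regs i3 (PySem.List.pyGetD regs i1 0)
    else if inst = "seti" then PySem.List.pySetD regs i3 i1
    else if inst = "gtir" then PySem.List.pySetD regs i3 (if i1 > PySem.List.pyGetD regs i2 0 then 1 else 0)
    else if inst = "gtri" then PySem.List.pySetD regs i3 (if PySem.List.pyGetD regs i1 0 > i2 then 1 else 0)
    else if inst = "gtrr" then PySem.List.pySetD regs i3 (if PySem.List.pyGetD regs i1 0 > PySem.List.pyGetD regs i2 0 then 1 else 0)
    else if inst = "eqir" then PySem.List.pySetD regs i3 (if i1 = PySem.List.pyGetD regs i2 0 then 1 else 0)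
    else if inst = "eqri" then PySem.List.pySetD regs i3 (if PySem.List.pyGetD regs i1 0 = i2 then 1 else 0)
    else if inst = "eqrr" then PySem.List.pySetD regs i3 (if PySem.List.pyGetD regs i1 0 = PySem.List.pyGetD regs i2 0 then 1 else 0)
    else regs
  (PySem.List.pyGetD regs' 0 0, PySem.List.pyGetD regs' 1 0, PySem.List.pyGetD regs' 2 0, PySem.List.pyGetD regs' 3 0)

-- ===== PORT B =====
-- the MODES table of Source B: name ↦ (operator tag, operand-1 mode, operand-2 mode)
def pvMODES : PySem.Dict String (String × String × String) :=
  PySem.Dict.ofList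
    [("addr", ("+", "r", "r")), ("addi", ("+", "r", "i")),
     ("mulr", ("*", "r", "r")), ("muli", ("*", "r", "i")),
     ("banr", ("&", "r", "r")), ("bani", ("&", "r", "i")),
     ("borr", ("|", "r", "r")), ("bori", ("|", "r", "i")),
     ("setr", ("s", "r", "i")), ("seti", ("s", "i", "i")),
     ("gtir", (">", "i", "r")), ("gtri", (">", "r", "i")), ("gtrr", (">", "r", "r")),
     ("eqir", ("=", "i", "r")), ("eqri", ("=", "r", "i")), ("eqrr", ("=", "r", "r"))]

def pvApply (op : String) (u v : Int) : Int :=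
  if op = "+" then u + v
  else if op = "*" then u * v
  else if op = "&" then PySem.Int.band u v
  else if op = "|" then PySem.Int.bor u v
  else if op = "s" then u
  else if op = ">" then (if u > v then 1 else 0)
  else (if u = v then 1 else 0)

def execute_instruction_alt (instruction : Int × Int × Int × Int) (registry : Int × Int × Int × Int) (instruction_map : List (Int × String)) : Int × Int × Int × Int :=
  let a := instruction.2.1
  let b := instruction.2.2.1
  let c := instruction.2.2.2
  let name := (pvLookup instruction_map instruction.1).getD ""
  let regs : List Int := [registry.1, registry.2.1, registry.2.2.1, registry.2.2.2]
  match PySem.Dict.get? pvMODES name with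
  | some (op, m1, m2) =>
    let u := if m1 = "r" then PySem.List.pyGetD regs a 0 else a
    let v := if m2 = "r" then PySem.List.pyGetD regs b 0 else b
    let regs' := PySem.List.pySetD regs c (pvApply op u v)
    (PySem.List.pyGetD regs' 0 0, PySem.List.pyGetD regs' 1 0, PySem.List.pyGetD regs' 2 0, PySem.List.pyGetD regs' 3 0)
  | none =>
    (PySem.List.pyGetD regs 0 0, PySem.List.pyGetD regs 1 0, PySem.List.pyGetD regs 2 0, PySem.List.pyGetD regs 3 0)

-- ===== PRECONDITION & SPEC =====
-- Pre_ excludes exactly the inputs on which A raises: a KeyError when instruction[0] is not a key of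
-- instruction_map, and an IndexError when an index actually used by the named opcode (register-mode
-- operands, and the write slot for any recognized opcode) is outside Python's range -4..3.
def Pre_execute_instruction (instruction : Int × Int × Int × Int) (registry : Int × Int × Int × Int) (instruction_map : List (Int × String)) : Prop :=
  (pvLookup instruction_map instruction.1).isSome = true ∧
  (∀ n ∈ pvLookup instruction_map instruction.1,
    (n ∈ ["addr", "addi", "mulr", "muli", "banr", "bani", "borr", "bori", "setr", "gtri", "gtrr", "eqri", "eqrr"] →
       -4 ≤ instruction.2.1 ∧ instruction.2.1 < 4) ∧
    (n ∈ ["addr", "mulr", "banr", "borr", "gtir", "gtrr", "eqir", "eqrr"] →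
       -4 ≤ instruction.2.2.1 ∧ instruction.2.2.1 < 4) ∧
    (n ∈ ["addr", "addi", "mulr", "muli", "banr", "bani", "borr", "bori", "setr", "seti",
          "gtir", "gtri", "gtrr", "eqir", "eqri", "eqrr"] →
       -4 ≤ instruction.2.2.2 ∧ instruction.2.2.2 < 4))
instance (instruction : Int × Int × Int × Int) (registry : Int × Int × Int × Int) (instruction_map : List (Int × String)) : Decidable (Pre_execute_instruction instruction registry instruction_map) := by unfold Pre_execute_instruction; infer_instance

def pvWitness_execute_instruction : (Int × Int × Int × Int) × (Int × Int × Int × Int) × (List (Int × String)) :=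
  ((0, 1, 2, 3), (5, 6, 7, 8), [(0, "addr")])

def Spec_execute_instruction (instruction : Int × Int × Int × Int) (registry : Int × Int × Int × Int) (instruction_map : List (Int × String)) (out : Int × Int × Int × Int) : Prop := out = execute_instruction_alt instruction registry instruction_map
instance (instruction : Int × Int × Int × Int) (registry : Int × Int × Int × Int) (instruction_map : List (Int × String)) (out : Int × Int × Int × Int) : Decidable (Spec_execute_instruction instruction registry instruction_map out) := by unfold Spec_execute_instruction; infer_instance

-- ===== CLAIM (what is proved, stated in full; the proofs are below) =====
def Claim_equal_execute_instruction : Prop := ∀ (instruction : Int × Int × Int × Int) (registry : Int × Int × Int × Int) (instruction_map : List (Int × String)), Dom_execute_instruction instruction registry instruction_map → Pre_execute_instruction instruction registry instruction_map → Spec_execute_instruction instruction registry instruction_map (execute_instruction instruction registry instruction_map)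

-- ===== LEMMAS AND PROOFS =====

-- unrecognized names miss the MODES table
lemma pvMODES_get?_none (n : String)
    (h1 : n ≠ "addr") (h2 : n ≠ "addi") (h3 : n ≠ "mulr") (h4 : n ≠ "muli")
    (h5 : n ≠ "banr") (h6 : n ≠ "bani") (h7 : n ≠ "borr") (h8 : n ≠ "bori")
    (h9 : n ≠ "setr") (h10 : n ≠ "seti") (h11 : n ≠ "gtir") (h12 : n ≠ "gtri")
    (h13 : n ≠ "gtrr") (h14 : n ≠ "eqir") (h15 : n ≠ "eqri") (h16 : n ≠ "eqrr") :
    PySem.Dict.get? pvMODES n = none := by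
  have hmk : pvMODES = PySem.Dict.mk
    [("addr", ("+", "r", "r")), ("addi", ("+", "r", "i")),
     ("mulr", ("*", "r", "r")), ("muli", ("*", "r", "i")),
     ("banr", ("&", "r", "r")), ("bani", ("&", "r", "i")),
     ("borr", ("|", "r", "r")), ("bori", ("|", "r", "i")),
     ("setr", ("s", "r", "i")), ("seti", ("s", "i", "i")),
     ("gtir", (">", "i", "r")), ("gtri", (">", "r", "i")), ("gtrr", (">", "r", "r")),
     ("eqir", ("=", "i", "r")), ("eqri", ("=", "r", "i")), ("eqrr", ("=", "r", "r"))] := by decide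
  simp [hmk, beq_iff_eq,
        Ne.symm h1, Ne.symm h2, Ne.symm h3, Ne.symm h4, Ne.symm h5, Ne.symm h6,
        Ne.symm h7, Ne.symm h8, Ne.symm h9, Ne.symm h10, Ne.symm h11, Ne.symm h12,
        Ne.symm h13, Ne.symm h14, Ne.symm h15, Ne.symm h16, PySem.Dict.get?]

-- ===== VERDICT (by name: the statement is the Claim_ definition above) =====
theorem execute_instruction_spec : Claim_equal_execute_instruction := by
  intro ins reg imap _ _
  unfold Spec_execute_instruction execute_instruction execute_instruction_alt
  cases h : pvLookup imap ins.1 with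
  | none => rfl
  | some n =>
    by_cases h1 : n = "addr"; · subst h1; rfl
    by_cases h2 : n = "addi"; · subst h2; rfl
    by_cases h3 : n = "mulr"; · subst h3; rfl
    by_cases h4 : n = "muli"; · subst h4; rfl
    by_cases h5 : n = "banr"; · subst h5; rfl
    by_cases h6 : n = "bani"; · subst h6; rfl
    by_cases h7 : n = "borr"; · subst h7; rfl
    by_cases h8 : n = "bori"; · subst h8; rfl
    by_cases h9 : n = "setr"; · subst h9; rfl
    by_cases h10 : n = "seti"; · subst h10; rfl
    by_cases h11 : n = "gtir"; · subst h11; rfl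
    by_cases h12 : n = "gtri"; · subst h12; rfl
    by_cases h13 : n = "gtrr"; · subst h13; rfl
    by_cases h14 : n = "eqir"; · subst h14; rfl
    by_cases h15 : n = "eqri"; · subst h15; rfl
    by_cases h16 : n = "eqrr"; · subst h16; rfl
    simp only [Option.getD_some,
               pvMODES_get?_none n h1 h2 h3 h4 h5 h6 h7 h8 h9 h10 h11 h12 h13 h14 h15 h16,
               if_neg h1, if_neg h2, if_neg h3, if_neg h4, if_neg h5, if_neg h6,
               if_neg h7, if_neg h8, if_neg h9, if_neg h10, if_neg h11, if_neg h12,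
               if_neg h13, if_neg h14, if_neg h15, if_neg h16]
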